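-- pv_equiv track=rewrite | github.com/stefano-ortona/google-kick-start | python/y2019/roundb/building_palindromes.py | build_occ_dictionary
-- ===== SOURCE A (Python) =====
-- def build_occ_dictionary(string):
--     occ_dict = {}
--     count = 1
--     index_dict = {0: {}}
--     for char in string:
--         val = occ_dict.get(char, 0) + 1
--         occ_dict[char] = val
--         dict_copy = dict(occ_dict)
--         index_dict[count] = dict_copy
--         count += 1
--     return index_dict
-- ===== SOURCE B (Python) =====
-- def build_occ_dictionary(string):
--     result = {}
--     for i in range(len(string) + 1):
--         counts = {}
--         for ch in string[:i]:
--             counts[ch] = counts.get(ch, 0) + 1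
--         result[i] = counts
--     return result
-- ===== Notes on version B (the rewrite author's own statement) =====
-- stated objective: simpler
-- what changed: B drops the running occurrence dict and its per-step copy: it recomputes each prefix's count dict independently from string[:i] inside a dict comprehension-style loop over range(len+1).
import Mathlib
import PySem

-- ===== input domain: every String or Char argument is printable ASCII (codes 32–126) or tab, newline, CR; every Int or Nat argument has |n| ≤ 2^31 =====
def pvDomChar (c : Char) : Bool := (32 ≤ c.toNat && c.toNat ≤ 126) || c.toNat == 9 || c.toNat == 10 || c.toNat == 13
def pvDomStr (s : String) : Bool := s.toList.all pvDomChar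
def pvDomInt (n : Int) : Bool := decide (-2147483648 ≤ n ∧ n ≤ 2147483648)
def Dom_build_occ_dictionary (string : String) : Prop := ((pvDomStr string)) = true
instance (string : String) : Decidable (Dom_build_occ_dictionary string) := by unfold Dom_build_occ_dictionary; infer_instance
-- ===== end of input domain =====

-- B replaces A's running occurrence dict (copied at every step) by an independent
-- recount of each prefix string[:i]; objective: simpler decomposition, same results.

-- ===== PORT A =====
def build_occ_dictionary (string : String) : List (Int × List (String × Int)) :=
  let fin := string.toList.foldl
    (fun (st : PySem.Dict String Int × Int × PySem.Dict Int (PySem.Dict String Int)) (c : Char) =>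
      let ch := String.singleton c
      let val := st.1.getD ch 0 + 1
      let occ := st.1.insert ch val
      -- dict_copy = dict(occ_dict): a value copy, identity in Lean
      (occ, st.2.1 + 1, st.2.2.insert st.2.1 occ))
    (PySem.Dict.empty, 1, PySem.Dict.empty.insert 0 PySem.Dict.empty)
  fin.2.2.items.map (fun p => (p.1, p.2.items))

-- ===== PORT B =====
def build_occ_dictionary_alt (string : String) : List (Int × List (String × Int)) :=
  let res := (PySem.List.pyRange 0 (PySem.Str.len string + 1) 1).foldl
    (fun (r : PySem.Dict Int (PySem.Dict String Int)) i =>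
      let counts := (PySem.List.slice string.toList none (some i)).foldl
        (fun (d : PySem.Dict String Int) c =>
          d.insert (String.singleton c) (d.getD (String.singleton c) 0 + 1))
        PySem.Dict.empty
      r.insert i counts)
    PySem.Dict.empty
  res.items.map (fun p => (p.1, p.2.items))

-- ===== PRECONDITION & SPEC =====
def Spec_build_occ_dictionary (string : String) (out : List (Int × List (String × Int))) : Prop := out = build_occ_dictionary_alt string
instance (string : String) (out : List (Int × List (String × Int))) : Decidable (Spec_build_occ_dictionary string out) := by unfold Spec_build_occ_dictionary; infer_instance

-- ===== CLAIM (what is proved, stated in full; the proofs are below) =====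
def Claim_equal_build_occ_dictionary : Prop := ∀ (string : String), Dom_build_occ_dictionary string → Spec_build_occ_dictionary string (build_occ_dictionary string)

-- ===== LEMMAS AND PROOFS =====

-- the shared inner counting loop (per-character increment-and-overwrite)
def pvOccFold (cs : List Char) : PySem.Dict String Int :=
  cs.foldl (fun d c => d.insert (String.singleton c) (d.getD (String.singleton c) 0 + 1))
    PySem.Dict.empty

lemma pvOccFold_append (cs : List Char) (c : Char) :
    pvOccFold (cs ++ [c])
    = (pvOccFold cs).insert (String.singleton c)
        ((pvOccFold cs).getD (String.singleton c) 0 + 1) := by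
  simp [pvOccFold, List.foldl_append]

-- characterisation of A's fold: final state is the prefix-count table keyed 0..n
lemma pvAFold_eq (cs : List Char) :
    cs.foldl
      (fun (st : PySem.Dict String Int × Int × PySem.Dict Int (PySem.Dict String Int)) (c : Char) =>
        let ch := String.singleton c
        let val := st.1.getD ch 0 + 1
        let occ := st.1.insert ch val
        (occ, st.2.1 + 1, st.2.2.insert st.2.1 occ))
      (PySem.Dict.empty, 1, PySem.Dict.empty.insert 0 PySem.Dict.empty)
    = (pvOccFold cs, (cs.length : Int) + 1,
       PySem.Dict.mk ((List.range (cs.length + 1)).map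
         (fun (i : Nat) => ((i : Int), pvOccFold (cs.take i))))) := by
  induction cs using List.reverseRecOn with
  | nil => rfl
  | append_singleton cs c ih =>
    rw [List.foldl_append, ih]
    simp only [List.foldl_cons, List.foldl_nil]
    refine Prod.ext ?_ (Prod.ext ?_ ?_)
    · rw [pvOccFold_append]
    · simp
    · apply PySem.Dict.ext
      rw [PySem.Dict.items_insert_of_not_contains]
      · simp only [List.length_append, List.length_cons, List.length_nil]
        conv_rhs => rw [show cs.length + (0 + 1) + 1 = (cs.length + 1) + 1 from rfl,
          List.range_succ, List.map_append]
        congr 1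
        · apply List.map_congr_left
          intro i hi
          rw [List.mem_range] at hi
          rw [List.take_append_of_le_length (by omega)]
        · simp only [List.map_cons, List.map_nil]
          have ht : List.take (cs.length + 1) (cs ++ [c]) = cs ++ [c] := by
            apply List.take_of_length_le; simp
          rw [ht, pvOccFold_append]
          push_cast
          rfl
      · rw [PySem.Dict.contains_eq_decide_mem_keys]
        simp only [PySem.Dict.keys, List.map_map, decide_eq_false_iff_not, List.mem_map,
          List.mem_range, Function.comp]
        rintro ⟨i, hi, h⟩
        have : i = cs.length + 1 := by exact_mod_cast h
        omega

lemma pvB_items (string : String) :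
    ((PySem.List.pyRange 0 (PySem.Str.len string + 1) 1).foldl
      (fun (r : PySem.Dict Int (PySem.Dict String Int)) i =>
        let counts := (PySem.List.slice string.toList none (some i)).foldl
          (fun (d : PySem.Dict String Int) c =>
            d.insert (String.singleton c) (d.getD (String.singleton c) 0 + 1))
          PySem.Dict.empty
        r.insert i counts)
      PySem.Dict.empty).items
    = (List.range (string.toList.length + 1)).map
        (fun (i : Nat) => ((i : Int), pvOccFold (string.toList.take i))) := by
  rw [PySem.Str.len_eq]
  have h1 : PySem.List.pyRange 0 ((string.toList.length : Int) + 1) 1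
      = (List.range (string.toList.length + 1)).map (fun k : Nat => (k : Int)) := by
    rw [PySem.List.pyRange_one]
    simp only [zero_add, sub_zero, Int.toNat_natCast_add_one]
  rw [h1, List.foldl_map]
  rw [PySem.Dict.items_foldl_insert_fresh (List.range (string.toList.length + 1))
        (fun a : Nat => (a : Int))
        (fun a : Nat => (PySem.List.slice string.toList none (some (a : Int))).foldl
          (fun (d : PySem.Dict String Int) c =>
            d.insert (String.singleton c) (d.getD (String.singleton c) 0 + 1))
          PySem.Dict.empty)
        PySem.Dict.empty
        (by intro a _; simp [pysem])
        ((List.nodup_range).map (fun _ _ h => by exact_mod_cast h))]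
  simp only [PySem.Dict.empty, List.nil_append, PySem.List.slice_to_natCast]
  rfl

-- ===== VERDICT (by name: the statement is the Claim_ definition above) =====
theorem build_occ_dictionary_spec : Claim_equal_build_occ_dictionary := by
  intro s _
  show build_occ_dictionary s = build_occ_dictionary_alt s
  simp only [build_occ_dictionary, build_occ_dictionary_alt, pvAFold_eq, pvB_items]
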